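-- pv_equiv track=rewrite | github.com/sfqy211/MatReflect_NN | pages/_modules/render_tool_actions.py | has_manifest_access_denied
-- ===== SOURCE A (Python) =====
-- def has_manifest_access_denied(log_lines):
--     joined = "\n".join(log_lines).lower()
--     patterns = [
--         "mt.exe : general error c101008d",
--         "failed to write the updated manifest",
--         "error 31",
--         "拒绝访问",
--         "access is denied",
--     ]
--     return any(pattern in joined for pattern in patterns)
-- ===== SOURCE B (Python) =====
-- _PATTERNS = (
--     "mt.exe : general error c101008d",
--     "failed to write the updated manifest",
--     "error 31",
--     "\u62d2\u7edd\u8bbf\u95ee",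
--     "access is denied",
-- )
--
--
-- def has_manifest_access_denied(log_lines):
--     # Scan line by line with early exit: no pattern contains a newline,
--     # so a match in the joined text always lies inside a single line.
--     for line in log_lines:
--         low = line.lower()
--         if any(p in low for p in _PATTERNS):
--             return True
--     return False
-- ===== Notes on version B (the rewrite author's own statement) =====
-- stated objective: alternative
-- what changed: Replaces the build-one-joined-lowercased-string-then-scan approach with a per-line streaming scan that lowercases each line separately and returns on the first matching line, avoiding materialising the joined log and justified by the fact that no pattern contains a newline.
import Mathlib
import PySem

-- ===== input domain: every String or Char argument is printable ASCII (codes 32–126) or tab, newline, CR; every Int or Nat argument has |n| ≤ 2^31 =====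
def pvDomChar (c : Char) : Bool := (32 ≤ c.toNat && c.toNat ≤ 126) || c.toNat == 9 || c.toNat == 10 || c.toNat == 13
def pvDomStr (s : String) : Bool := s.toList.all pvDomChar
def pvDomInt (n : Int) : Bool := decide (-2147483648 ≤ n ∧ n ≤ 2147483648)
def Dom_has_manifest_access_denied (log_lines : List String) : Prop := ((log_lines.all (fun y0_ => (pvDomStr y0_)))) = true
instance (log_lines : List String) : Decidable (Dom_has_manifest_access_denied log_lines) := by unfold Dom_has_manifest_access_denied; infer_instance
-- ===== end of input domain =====

-- B scans the log line by line with early exit instead of joining and lowercasing the whole log first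
-- (valid since no pattern contains a newline); objective: alternative decomposition.

-- ===== PORT A =====
def has_manifest_access_denied (log_lines : List String) : Bool :=
  let joined := PySem.Str.lower (PySem.Str.join "\n" log_lines)
  let patterns : List String :=
    [ "mt.exe : general error c101008d"
    , "failed to write the updated manifest"
    , "error 31"
    , "拒绝访问"
    , "access is denied" ]
  patterns.any (fun pattern => PySem.Str.isIn pattern joined)

-- ===== PORT B =====
def hmadPatterns : List String :=
  [ "mt.exe : general error c101008d"
  , "failed to write the updated manifest"
  , "error 31"
  , "拒绝访问"
  , "access is denied" ]

-- the 'for line in log_lines: … return True / return False' loop of Source B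
def hmadScan : List String → Bool
  | [] => false
  | line :: rest =>
    let low := PySem.Str.lower line
    if hmadPatterns.any (fun p => PySem.Str.isIn p low) then true else hmadScan rest

def has_manifest_access_denied_alt (log_lines : List String) : Bool :=
  hmadScan log_lines

-- ===== PRECONDITION & SPEC =====
def Spec_has_manifest_access_denied (log_lines : List String) (out : Bool) : Prop := out = has_manifest_access_denied_alt log_lines
instance (log_lines : List String) (out : Bool) : Decidable (Spec_has_manifest_access_denied log_lines out) := by unfold Spec_has_manifest_access_denied; infer_instance

-- ===== CLAIM (what is proved, stated in full; the proofs are below) =====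
def Claim_equal_has_manifest_access_denied : Prop := ∀ (log_lines : List String), Dom_has_manifest_access_denied log_lines → Spec_has_manifest_access_denied log_lines (has_manifest_access_denied log_lines)

-- ===== LEMMAS AND PROOFS =====

-- a pattern avoiding c that is a prefix of xs ++ c :: ys is a prefix of xs
theorem hmad_prefix_drop {α : Type} [DecidableEq α] {c : α} {p : List α} (hc : c ∉ p) :
    ∀ {xs ys : List α}, p <+: xs ++ c :: ys → p <+: xs := by
  induction p with
  | nil => intro xs ys _; exact List.nil_prefix
  | cons q p' ih =>
    intro xs ys h
    cases xs with
    | nil =>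
      rcases List.cons_prefix_cons.mp h with ⟨hq, _⟩
      exact absurd hq.symm (by simp [List.mem_cons, not_or] at hc; exact hc.1)
    | cons a xs' =>
      rcases List.cons_prefix_cons.mp h with ⟨hq, hrest⟩
      refine List.cons_prefix_cons.mpr ⟨hq, ih ?_ hrest⟩
      simp [List.mem_cons, not_or] at hc; exact hc.2

-- a pattern avoiding c matches across xs ++ c :: ys iff it matches in xs or in ys
theorem hmad_infix_append_cons {α : Type} [DecidableEq α] {c : α} {p : List α} (hc : c ∉ p) :
    ∀ {xs ys : List α}, (p <:+: xs ++ c :: ys ↔ p <:+: xs ∨ p <:+: ys) := by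
  intro xs ys
  constructor
  · intro h
    induction xs with
    | nil =>
      rcases List.infix_cons_iff.mp h with h1 | h2
      · cases p with
        | nil => exact Or.inl (List.nil_infix)
        | cons q p' =>
          rcases List.cons_prefix_cons.mp h1 with ⟨hq, _⟩
          exact absurd hq.symm (by simp [List.mem_cons, not_or] at hc; exact hc.1)
      · exact Or.inr h2
    | cons a xs' ih =>
      rcases List.infix_cons_iff.mp h with h1 | h2
      · exact Or.inl (hmad_prefix_drop hc (by simpa using h1)).isInfix
      · rcases ih h2 with hl | hr
        · exact Or.inl (List.infix_cons hl)
        · exact Or.inr hr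
  · rintro (h | h)
    · rcases h with ⟨s, t, hst⟩
      exact ⟨s, t ++ c :: ys, by simpa [List.append_assoc] using congrArg (· ++ c :: ys) hst⟩
    · rcases h with ⟨s, t, hst⟩
      exact ⟨xs ++ c :: s, t, by simp [← hst]⟩

-- a newline-free nonempty pattern matches the '\n'-join iff it matches some part
theorem hmad_infix_join {c : Char} {p : List Char} (hp : p ≠ []) (hc : c ∉ p) :
    ∀ parts : List (List Char), (p <:+: PySem.Chars.join [c] parts ↔ ∃ x ∈ parts, p <:+: x) := by
  intro parts
  induction parts with
  | nil =>
    simp only [PySem.Chars.join_nil]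
    constructor
    · intro h; exact absurd (List.eq_nil_of_infix_nil h) hp
    · rintro ⟨x, hx, _⟩; simp at hx
  | cons x rest ih =>
    cases rest with
    | nil => simp [PySem.Chars.join_singleton]
    | cons y rest' =>
      rw [PySem.Chars.join_cons_cons]
      rw [List.append_assoc]
      simp only [List.singleton_append]
      rw [hmad_infix_append_cons hc, ih]
      constructor
      · rintro (h | ⟨z, hz, hpz⟩)
        · exact ⟨x, by simp, h⟩
        · exact ⟨z, by simp [hz], hpz⟩
      · rintro ⟨z, hz, hpz⟩
        rcases List.mem_cons.mp hz with rfl | hz'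
        · exact Or.inl hpz
        · exact Or.inr ⟨z, hz', hpz⟩

-- lower commutes with the '\n'-join (lowerChar fixes '\n')
theorem hmad_lower_join : ∀ parts : List (List Char),
    PySem.Chars.lower (PySem.Chars.join ['\n'] parts) = PySem.Chars.join ['\n'] (parts.map PySem.Chars.lower) := by
  intro parts
  induction parts with
  | nil => rfl
  | cons x rest ih =>
    cases rest with
    | nil => simp [PySem.Chars.join_singleton]
    | cons y rest' =>
      rw [PySem.Chars.join_cons_cons, List.map_cons, List.map_cons,
        PySem.Chars.join_cons_cons, ← List.map_cons (f := PySem.Chars.lower) (a := y) (l := rest'), ← ih]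
      show List.map PySem.Chars.lowerChar _ = _
      rw [List.map_append, List.map_append]
      rfl

-- per-pattern: matching the lowercased join is matching some lowercased line
theorem hmad_per_pattern (p : String) (hp : p.toList ≠ []) (hc : '\n' ∉ p.toList)
    (ls : List String) :
    PySem.Str.isIn p (PySem.Str.lower (PySem.Str.join "\n" ls))
      = ls.any (fun l => PySem.Str.isIn p (PySem.Str.lower l)) := by
  rw [Bool.eq_iff_iff]
  simp only [PySem.Str.isIn_eq, PySem.Chars.isIn_iff_infix, PySem.Str.toList_lower,
    PySem.Str.toList_join, List.any_eq_true]
  rw [show ("\n" : String).toList = ['\n'] from rfl, hmad_lower_join,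
    hmad_infix_join hp hc (c := '\n')]
  constructor
  · rintro ⟨x, hx, hpx⟩
    rcases List.mem_map.mp hx with ⟨cs, hcs, rfl⟩
    rcases List.mem_map.mp hcs with ⟨l, hl, rfl⟩
    exact ⟨l, hl, by simpa [PySem.Chars.isIn_iff_infix] using hpx⟩
  · rintro ⟨l, hl, hpl⟩
    exact ⟨PySem.Chars.lower l.toList, by
      exact List.mem_map.mpr ⟨l.toList, List.mem_map.mpr ⟨l, hl, rfl⟩, rfl⟩,
      by simpa [PySem.Chars.isIn_iff_infix] using hpl⟩

-- B's early-exit loop is the 'any' over lines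
theorem hmad_scan_eq (ls : List String) :
    hmadScan ls = ls.any (fun l => hmadPatterns.any (fun p => PySem.Str.isIn p (PySem.Str.lower l))) := by
  induction ls with
  | nil => rfl
  | cons a t ih =>
    rw [hmadScan, List.any_cons, ← ih]
    cases hmadPatterns.any (fun p => PySem.Str.isIn p (PySem.Str.lower a)) <;> simp

-- 'or of anys' commutes into 'any of ors'
theorem hmad_any_or (l : List String) (p q : String → Bool) :
    (l.any p || l.any q) = l.any (fun x => p x || q x) := by
  induction l with
  | nil => rfl
  | cons a t ih =>
    simp only [List.any_cons, ← ih]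
    cases p a <;> cases q a <;> simp

-- ===== VERDICT (by name: the statement is the Claim_ definition above) =====
theorem has_manifest_access_denied_spec : Claim_equal_has_manifest_access_denied := by
  intro ls _
  show has_manifest_access_denied ls = has_manifest_access_denied_alt ls
  rw [has_manifest_access_denied_alt, hmad_scan_eq]
  rw [has_manifest_access_denied]
  simp only [List.any_cons, List.any_nil, Bool.or_false]
  rw [hmad_per_pattern _ (by decide) (by decide),
      hmad_per_pattern _ (by decide) (by decide),
      hmad_per_pattern _ (by decide) (by decide),
      hmad_per_pattern _ (by decide) (by decide),
      hmad_per_pattern _ (by decide) (by decide)]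
  rw [hmad_any_or, hmad_any_or, hmad_any_or, hmad_any_or]
  simp only [hmadPatterns, List.any_cons, List.any_nil, Bool.or_false]
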